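-- pv_equiv track=rewrite | github.com/Patrick-Michael/CDSS-Prosthesis | backend/span_detector.py | _find_consecutive_runs
-- ===== SOURCE A (Python) =====
-- from typing import List, Dict, Optional, Set, Tuple
--
-- def _find_consecutive_runs(sorted_missing: List[str], arch_order: List[str]) -> List[List[str]]:
--     if not sorted_missing:
--         return []
--     pos = {t: i for i, t in enumerate(arch_order)}
--     runs: List[List[str]] = []
--     current: List[str] = [sorted_missing[0]]
--     for prev, curr in zip(sorted_missing, sorted_missing[1:]):
--         if pos[curr] == pos[prev] + 1:
--             current.append(curr)
--         else:
--             runs.append(current)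
--             current = [curr]
--     runs.append(current)
--     return runs
-- ===== SOURCE B (Python) =====
-- from typing import List
--
-- def _find_consecutive_runs(sorted_missing: List[str], arch_order: List[str]) -> List[List[str]]:
--     if not sorted_missing:
--         return []
--     pos = {t: i for i, t in enumerate(arch_order)}
--     n = len(sorted_missing)
--     # Pass 1: indices where a new run starts (a break in arch-consecutiveness).
--     breaks = [0] + [i for i in range(1, n)
--                     if pos[sorted_missing[i]] != pos[sorted_missing[i - 1]] + 1] + [n]
--     # Pass 2: slice the list between consecutive break indices.
--     return [sorted_missing[a:b] for a, b in zip(breaks, breaks[1:])]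
-- ===== Notes on version B (the rewrite author's own statement) =====
-- stated objective: alternative
-- what changed: Replaces A's single-pass accumulator loop (growing a current run and flushing it at breaks) with a staged index-based computation: first collect the list of break indices where arch-consecutiveness fails, then return the slices of sorted_missing between consecutive break indices.
import Mathlib
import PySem

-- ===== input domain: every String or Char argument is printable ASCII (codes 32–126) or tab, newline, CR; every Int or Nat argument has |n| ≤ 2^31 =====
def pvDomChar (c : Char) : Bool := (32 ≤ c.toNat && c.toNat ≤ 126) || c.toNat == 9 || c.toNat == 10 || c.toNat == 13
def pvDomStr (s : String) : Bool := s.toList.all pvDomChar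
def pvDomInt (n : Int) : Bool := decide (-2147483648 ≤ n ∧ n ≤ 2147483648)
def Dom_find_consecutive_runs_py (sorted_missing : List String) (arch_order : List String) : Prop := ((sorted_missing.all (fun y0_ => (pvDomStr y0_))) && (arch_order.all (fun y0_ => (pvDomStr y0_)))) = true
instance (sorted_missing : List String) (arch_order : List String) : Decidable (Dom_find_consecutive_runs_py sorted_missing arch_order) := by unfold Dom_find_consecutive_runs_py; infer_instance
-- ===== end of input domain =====

-- B is an alternative decomposition: instead of A's one-pass accumulator loop it first computes the
-- list of break indices and then materializes the runs as slices between consecutive breaks.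
-- Pre_ excludes inputs where A raises KeyError (a tooth of a length ≥ 2 list absent from arch_order); B raises KeyError there too.


-- ===== PORT A =====
-- pos = {t: i for i, t in enumerate(arch_order)}   (shared helper: both Pythons build this dict the same way)
def pvPosDict (arch_order : List String) : PySem.Dict String Int :=
  (PySem.List.enumerate arch_order).foldl (fun d p => d.insert p.2 p.1) PySem.Dict.empty

def find_consecutive_runs_py (sorted_missing : List String) (arch_order : List String) : List (List String) :=
  match sorted_missing with
  | [] => []
  | h :: t =>
    let pos := pvPosDict arch_order
    -- for prev, curr in zip(sorted_missing, sorted_missing[1:]):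
    let st := (List.zip (h :: t) t).foldl
      (fun (st : List (List String) × List String) pc =>
        if (pos.getD pc.2 0) = (pos.getD pc.1 0) + 1 then
          (st.1, st.2 ++ [pc.2])
        else
          (st.1 ++ [st.2], [pc.2]))
      ([], [h])
    st.1 ++ [st.2]

-- ===== PORT B =====
def find_consecutive_runs_py_alt (sorted_missing : List String) (arch_order : List String) : List (List String) :=
  match sorted_missing with
  | [] => []
  | _ :: _ =>
    let pos := pvPosDict arch_order
    let n : Int := sorted_missing.length
    -- breaks = [0] + [i for i in range(1, n) if pos[sm[i]] != pos[sm[i-1]] + 1] + [n]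
    let breaks : List Int :=
      0 :: ((PySem.List.pyRange 1 n 1).filter
        (fun i => !(pos.getD (PySem.List.pyGetD sorted_missing i "") 0
                    == pos.getD (PySem.List.pyGetD sorted_missing (i - 1) "") 0 + 1)) ++ [n])
    -- return [sm[a:b] for a, b in zip(breaks, breaks[1:])]
    (List.zip breaks breaks.tail).map
      (fun ab => PySem.List.slice sorted_missing (some ab.1) (some ab.2))

-- ===== PRECONDITION & SPEC =====
-- Pre_ excludes exactly the inputs on which Python A raises KeyError (some tooth of a
-- length ≥ 2 sorted_missing absent from arch_order); Python B raises KeyError on the same inputs.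
def Pre_find_consecutive_runs_py (sorted_missing : List String) (arch_order : List String) : Prop :=
  sorted_missing.length ≤ 1 ∨ ∀ t ∈ sorted_missing, t ∈ arch_order
instance (sorted_missing : List String) (arch_order : List String) : Decidable (Pre_find_consecutive_runs_py sorted_missing arch_order) := by unfold Pre_find_consecutive_runs_py; infer_instance

def pvWitness_find_consecutive_runs_py : List String × List String :=
  (["2", "3", "5"], ["1", "2", "3", "4", "5", "6"])

def Spec_find_consecutive_runs_py (sorted_missing : List String) (arch_order : List String) (out : List (List String)) : Prop := out = find_consecutive_runs_py_alt sorted_missing arch_order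
instance (sorted_missing : List String) (arch_order : List String) (out : List (List String)) : Decidable (Spec_find_consecutive_runs_py sorted_missing arch_order out) := by unfold Spec_find_consecutive_runs_py; infer_instance

-- ===== CLAIM (what is proved, stated in full; the proofs are below) =====
def Claim_equal_find_consecutive_runs_py : Prop := ∀ (sorted_missing : List String) (arch_order : List String), Dom_find_consecutive_runs_py sorted_missing arch_order → Pre_find_consecutive_runs_py sorted_missing arch_order → Spec_find_consecutive_runs_py sorted_missing arch_order (find_consecutive_runs_py sorted_missing arch_order)

-- ===== LEMMAS AND PROOFS =====

-- the common abstract result: maximal chunks of positions increasing by exactly 1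
def pvChunks (pos : PySem.Dict String Int) (prev : String) (cur : List String) :
    List String → List (List String)
  | [] => [cur]
  | c :: t =>
    if pos.getD c 0 = pos.getD prev 0 + 1 then pvChunks pos c (cur ++ [c]) t
    else cur :: pvChunks pos c [c] t

-- A's fold produces pvChunks
theorem pvMainA (pos : PySem.Dict String Int) (t : List String) :
    ∀ (prev : String) (runs : List (List String)) (cur : List String),
    ((List.zip (prev :: t) t).foldl
        (fun (st : List (List String) × List String) pc =>
          if (pos.getD pc.2 0) = (pos.getD pc.1 0) + 1 then
            (st.1, st.2 ++ [pc.2])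
          else
            (st.1 ++ [st.2], [pc.2])) (runs, cur)).1 ++
    [((List.zip (prev :: t) t).foldl
        (fun (st : List (List String) × List String) pc =>
          if (pos.getD pc.2 0) = (pos.getD pc.1 0) + 1 then
            (st.1, st.2 ++ [pc.2])
          else
            (st.1 ++ [st.2], [pc.2])) (runs, cur)).2]
    = runs ++ pvChunks pos prev cur t := by
  induction t with
  | nil => intro prev runs cur; simp [pvChunks]
  | cons c t ih =>
    intro prev runs cur
    simp only [List.zip_cons_cons, List.foldl_cons, pvChunks]
    by_cases h : (pos.getD c 0) = (pos.getD prev 0) + 1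
    · rw [if_pos h, if_pos h, ih c runs (cur ++ [c])]
    · rw [if_neg h, if_neg h, ih c (runs ++ [cur]) [c]]
      simp

-- adjacent-pair slicing, as produced by B's zip/map
def pvG (sm : List String) (a : Int) : List Int → List (List String)
  | [] => []
  | b :: l => PySem.List.slice sm (some a) (some b) :: pvG sm b l

theorem pvZipMap (sm : List String) :
    ∀ (l : List Int) (a : Int),
    (List.zip (a :: l) l).map (fun ab => PySem.List.slice sm (some ab.1) (some ab.2))
      = pvG sm a l := by
  intro l
  induction l with
  | nil => intro a; simp [pvG]
  | cons b l ih => intro a; simp [pvG, ih]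

-- B's staged breaks-then-slice computation also produces pvChunks
theorem pvMainB (pos : PySem.Dict String Int) (sm : List String) :
    ∀ (fuel j a : Nat), sm.length - j = fuel → j ≤ sm.length → a < j →
    pvG sm (a : Int)
      ((PySem.List.pyRange (j : Int) (sm.length : Int) 1).filter
        (fun i => !(pos.getD (PySem.List.pyGetD sm i "") 0
                    == pos.getD (PySem.List.pyGetD sm (i - 1) "") 0 + 1)) ++ [(sm.length : Int)])
    = pvChunks pos (sm.getD (j - 1) "") ((sm.drop a).take (j - a)) (sm.drop j) := by
  intro fuel
  induction fuel with
  | zero =>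
    intro j a hf hj ha
    have hjl : j = sm.length := by omega
    subst hjl
    rw [PySem.List.pyRange_one_eq_nil (by omega)]
    simp only [List.filter_nil, List.nil_append, pvG, pvChunks, List.drop_length]
    rw [PySem.List.slice_natCast]
  | succ fuel ih =>
    intro j a hf hj ha
    have hjl : j < sm.length := by omega
    have hj1 : j - 1 < sm.length := by omega
    rw [PySem.List.pyRange_one_cons (by exact_mod_cast hjl)]
    have e1 : sm.getD j "" = sm[j] := by
      rw [List.getD_eq_getElem?_getD, List.getElem?_eq_getElem hjl]; rfl
    have e3 : sm.getD (j - 1) "" = sm[j - 1] := by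
      rw [List.getD_eq_getElem?_getD, List.getElem?_eq_getElem hj1]; rfl
    have hget : PySem.List.pyGetD sm (j : Int) "" = sm[j] := by
      rw [PySem.List.pyGetD_natCast, e1]
    have hget' : PySem.List.pyGetD sm ((j : Int) - 1) "" = sm[j - 1] := by
      have ej : ((j : Int) - 1) = ((j - 1 : Nat) : Int) := by omega
      rw [ej, PySem.List.pyGetD_natCast, e3]
    have hdropj : sm.drop j = sm[j] :: sm.drop (j + 1) := List.drop_eq_getElem_cons hjl
    have h2 := fun (a : Nat) ha' => ih (j + 1) a (by omega) (by omega) ha'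
    simp only [Nat.cast_add, Nat.cast_one, Nat.add_sub_cancel] at h2
    simp only [List.filter_cons, hget, hget']
    by_cases h : pos.getD sm[j] 0 = pos.getD sm[j - 1] 0 + 1
    · have hb : (!(pos.getD sm[j] 0 == pos.getD sm[j - 1] 0 + 1)) = false := by simp [h]
      rw [hb]
      simp only [Bool.false_eq_true, if_false]
      rw [h2 a (by omega), e1, e3, hdropj]
      simp only [pvChunks, if_pos h]
      have hcur : (sm.drop a).take (j + 1 - a) = (sm.drop a).take (j - a) ++ [sm[j]] := by
        have h1 : j + 1 - a = (j - a) + 1 := by omega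
        rw [h1, List.take_add_one]
        have hx : (sm.drop a)[j - a]? = some sm[j] := by
          rw [List.getElem?_drop]
          have hax : a + (j - a) = j := by omega
          rw [hax, List.getElem?_eq_getElem hjl]
        simp [hx]
      rw [hcur]
    · have hb : (!(pos.getD sm[j] 0 == pos.getD sm[j - 1] 0 + 1)) = true := by simp [h]
      rw [hb]
      simp only [if_true, List.cons_append]
      have hstep : ∀ (x : Int) (L : List Int),
          pvG sm (↑a) (x :: L) = PySem.List.slice sm (some ↑a) (some x) :: pvG sm x L :=
        fun _ _ => rfl
      rw [hstep, h2 j (by omega), e1, e3, hdropj]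
      simp only [pvChunks, if_neg h]
      rw [PySem.List.slice_natCast]
      congr 2
      · have hx : j + 1 - j = 1 := by omega
        rw [hx, List.take_one]
        simp

-- ===== VERDICT (by name: the statement is the Claim_ definition above) =====
theorem find_consecutive_runs_py_spec : Claim_equal_find_consecutive_runs_py := by
  intro sorted_missing arch_order _ _
  unfold Spec_find_consecutive_runs_py find_consecutive_runs_py find_consecutive_runs_py_alt
  cases sorted_missing with
  | nil => rfl
  | cons h t =>
    simp only [List.tail_cons]
    rw [pvZipMap]
    rw [pvMainA (pvPosDict arch_order) t h [] [h]]
    have hmb := pvMainB (pvPosDict arch_order) (h :: t) t.length 1 0 (by simp) (by simp) (by omega)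
    simp only [Nat.cast_one, Nat.cast_zero, List.drop_zero] at hmb
    rw [hmb]
    simp
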